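-- pv_equiv track=rewrite | github.com/antopuli/python-projects | rows-counter.py | count_rows
-- ===== SOURCE A (Python) =====
-- def count_rows(text):
--
--     # create a list containing all the characters of the given argument
--     tList = list(text)
--
--     # create a list that will contain all the text's rows
--     rows = []
--
--     # create a string that will contain a row to append to rows
--     row = ''
--
--     # the for loop navigate from 0 to tList's length
--
--     # if the element of tList with a index of 'i' is equal to '\n' or
--     # 'i' is the last index of tList then the 'row' variable will be append to
--     # the 'rows' one as a list and it will be initialized as an empty string
--
--     # else the element of tList with a index of 'i' will be concatenated to
--     # the 'row' existing string
--
--     for i in range(len(tList)):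
--         if tList[i] == '\n' or i == (len(tList)-1):
--             rows.append(list(row))
--             row = ''
--         else:
--             row += tList[i]
--
--     # the for loop navigate from 0 to the number of empty lists contained in the
--     # 'rows' variable
--
--     # remove from the 'rows' list the empyt ones
--
--     for i in range(rows.count([])): rows.remove([])
--
--     # return the number of rows
--     return len(rows)
-- ===== SOURCE B (Python) =====
-- def count_rows(text):
--     # One pass, O(1) extra space: count the starts of maximal runs of
--     # non-newline characters (each such run is one non-empty row).
--     count = 0
--     prev = '\n'
--     for c in text:
--         if c != '\n' and prev == '\n':
--             count += 1
--         prev = c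
--     return count
-- ===== Notes on version B (the rewrite author's own statement) =====
-- stated objective: faster
-- what changed: B replaces A's per-character list building, row collection and repeated remove()-based empty-row deletion with a single pass that counts starts of maximal non-newline runs in O(1) extra space.
-- intended difference: On texts whose final line consists of exactly one non-newline character (e.g. 'a' or 'x\ny'[last line one char]), A drops the last character before splitting and so under-counts by one (A('a')==0), while B counts that final one-character line as a row, which is the intended behaviour of a row counter. — e.g. on count_rows("a"): A returns 0, B returns 1
import Mathlib
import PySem

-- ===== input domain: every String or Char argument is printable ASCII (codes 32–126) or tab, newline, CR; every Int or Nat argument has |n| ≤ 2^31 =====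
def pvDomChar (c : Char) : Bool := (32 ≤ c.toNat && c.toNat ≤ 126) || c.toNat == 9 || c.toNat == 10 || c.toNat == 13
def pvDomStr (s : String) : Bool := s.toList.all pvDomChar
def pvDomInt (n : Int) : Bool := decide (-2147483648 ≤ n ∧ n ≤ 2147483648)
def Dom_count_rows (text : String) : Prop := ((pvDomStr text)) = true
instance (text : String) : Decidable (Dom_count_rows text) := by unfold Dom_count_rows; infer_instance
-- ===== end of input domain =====

-- B replaces A's char-list building, row collection and repeated remove()-deletion of empty
-- rows with a single O(1)-space pass counting starts of non-newline runs; on texts whose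
-- final line is exactly one character A under-counts by one (see D_count_rows below).

-- ===== PORT A =====
-- loop body of A's first for-loop, named for the proofs (literally the loop body)
def stepA (tList : List Char) (st : List (List Char) × List Char) (i : Int) :
    List (List Char) × List Char :=
  if PySem.List.pyGetD tList i 'a' = '\n' ∨ i = (tList.length : Int) - 1 then
    (st.1 ++ [st.2], [])
  else
    (st.1, st.2 ++ [PySem.List.pyGetD tList i 'a'])

def count_rows (text : String) : Int :=
  let tList := text.toList
  let fin := (PySem.List.pyRange 0 (tList.length : Int) 1).foldl (stepA tList) ([], [])
  let rows := fin.1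
  let rows2 := (PySem.List.pyRange 0 ((PySem.List.count rows ([] : List Char) : Int)) 1).foldl
      (fun rs (_ : Int) => (PySem.List.remove? rs ([] : List Char)).getD rs) rows
  (rows2.length : Int)

-- ===== PORT B =====
def count_rows_alt (text : String) : Int :=
  (text.toList.foldl
    (fun (st : Int × Char) c =>
      if c ≠ '\n' ∧ st.2 = '\n' then (st.1 + 1, c) else (st.1, c))
    (0, '\n')).1

-- ===== PRECONDITION & SPEC =====
-- On texts whose final line consists of exactly one non-newline character, A drops that
-- character before splitting and under-counts by one (A "a" = 0), while B counts that
-- one-character final line as a row, which is the intended behaviour of a row counter.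
def D_count_rows (text : String) : Prop :=
  text.toList ≠ [] ∧ text.toList.getLast? ≠ some '\n' ∧
    (text.toList.length = 1 ∨ text.toList.dropLast.getLast? = some '\n')
instance (text : String) : Decidable (D_count_rows text) := by unfold D_count_rows; infer_instance

def Spec_count_rows (text : String) (out : Int) : Prop :=
  ¬ D_count_rows text → out = count_rows_alt text
instance (text : String) (out : Int) : Decidable (Spec_count_rows text out) := by
  unfold Spec_count_rows; infer_instance

def pvDiffWitness_count_rows : String := "a"
def pvDiffWitnessOut_count_rows : Int × Int := (0, 1)

-- ===== CLAIM (what is proved, stated in full; the proofs are below) =====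
def Claim_unchanged_count_rows : Prop :=
  ∀ (text : String), Dom_count_rows text → Spec_count_rows text (count_rows text)
def Claim_changed_count_rows : Prop :=
  Dom_count_rows (pvDiffWitness_count_rows) ∧ D_count_rows (pvDiffWitness_count_rows) ∧
    count_rows (pvDiffWitness_count_rows) = pvDiffWitnessOut_count_rows.1 ∧
    count_rows_alt (pvDiffWitness_count_rows) = pvDiffWitnessOut_count_rows.2 ∧
    pvDiffWitnessOut_count_rows.1 ≠ pvDiffWitnessOut_count_rows.2
def Claim_exact_count_rows : Prop :=
  ∀ (text : String), Dom_count_rows text → D_count_rows text →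
    count_rows text ≠ count_rows_alt text

-- ===== LEMMAS AND PROOFS =====

lemma getLast?_cons_ne {d : Char} {xs : List Char} (h : xs ≠ []) :
    (d :: xs).getLast? = xs.getLast? := by
  cases xs with
  | nil => exact absurd rfl h
  | cons b l => exact List.getLast?_cons_cons

-- reference splitter: process chars, '\n' flushes the pending row, end flushes too
def spl (row : List Char) : List Char → List (List Char)
  | [] => [row]
  | c :: cs => if c = '\n' then row :: spl [] cs else spl (row ++ [c]) cs

def pNE : List Char → Bool := fun r => !r.isEmpty

-- ---- A-side ----

lemma loopA (l : List Char) :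
    ∀ k a (rows : List (List Char)) (row : List Char), a + k = l.length → 0 < k →
      (PySem.List.pyRange (a : Int) (l.length : Int) 1).foldl (stepA l) (rows, row) =
        (rows ++ spl row ((l.drop a).dropLast), []) := by
  intro k
  induction k with
  | zero => omega
  | succ k ih =>
    intro a rows row hlen _
    have ha : (a : Int) < (l.length : Int) := by omega
    rw [PySem.List.pyRange_one_cons ha]
    have haN : a < l.length := by omega
    have hdrop : l.drop a = l[a] :: l.drop (a + 1) := List.drop_eq_getElem_cons haN
    simp only [List.foldl_cons]
    by_cases hk : k = 0
    · -- last index: a = l.length - 1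
      subst hk
      have hlast : (a : Int) = (l.length : Int) - 1 := by omega
      have : stepA l (rows, row) (a : Int) = (rows ++ [row], []) := by
        simp [stepA, hlast]
      rw [this]
      have hnil : PySem.List.pyRange ((a : Int) + 1) (l.length : Int) 1 = [] := by
        simp [PySem.List.pyRange]; omega
      rw [hnil]
      have hd1 : (l.drop a).length = 1 := by simp; omega
      have : (l.drop a).dropLast = [] := by
        cases h : l.drop a with
        | nil => simp
        | cons x xs => rw [h] at hd1; simp at hd1; simp [hd1]
      simp [this, spl]
    · -- a < l.length - 1
      have ha1 : a + 1 < l.length := by omega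
      have hne : l.drop (a + 1) ≠ [] := by
        intro h
        have := List.drop_eq_nil_iff.mp h
        omega
      have hdl : (l.drop a).dropLast = l[a] :: (l.drop (a + 1)).dropLast := by
        rw [hdrop]
        exact List.dropLast_cons_of_ne_nil hne
      have hget : PySem.List.pyGetD l (a : Int) 'a' = l[a] := by
        rw [PySem.List.pyGetD_natCast]
        simp [List.getD, haN]
      have hne2 : ((a : Int) = (l.length : Int) - 1) = False := by
        simp; omega
      by_cases hc : l[a] = '\n'
      · have : stepA l (rows, row) (a : Int) = (rows ++ [row], []) := by
          simp [stepA, hget, hc]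
        rw [this]
        have := ih (a + 1) (rows ++ [row]) [] (by omega) (by omega)
        push_cast at this ⊢
        rw [this, hdl, hc]
        simp [spl]
      · have : stepA l (rows, row) (a : Int) = (rows, row ++ [l[a]]) := by
          simp only [stepA, hget, hne2]
          simp [hc]
        rw [this]
        have := ih (a + 1) rows (row ++ [l[a]]) (by omega) (by omega)
        push_cast at this ⊢
        rw [this, hdl]
        simp [spl, hc]

-- ---- removal loop ----

lemma foldl_const {α β : Type} (g : α → α) :
    ∀ (l : List β) (a : α), List.foldl (fun x _ => g x) a l = g^[l.length] a := by
  intro l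
  induction l with
  | nil => intro a; simp
  | cons x xs ih => intro a; simp [ih, Function.iterate_succ_apply]

lemma filter_erase_nil :
    ∀ (rows : List (List Char)), (rows.erase []).filter pNE = rows.filter pNE := by
  intro rows
  induction rows with
  | nil => simp
  | cons r rs ih =>
    by_cases h : r = ([] : List Char)
    · subst h; simp [List.erase_cons, pNE]
    · have : (r == ([] : List Char)) = false := by simp [h]
      simp [List.erase_cons, this, List.filter_cons, ih]

lemma removeAll :
    ∀ (m : Nat) (rows : List (List Char)), List.count ([] : List Char) rows = m →
      (fun rs => (PySem.List.remove? rs ([] : List Char)).getD rs)^[m] rows =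
        rows.filter pNE := by
  intro m
  induction m with
  | zero =>
    intro rows h
    have hnm : ([] : List Char) ∉ rows := by
      intro hm; have := List.count_pos_iff.mpr hm; omega
    simp only [Function.iterate_zero, id_eq]
    symm
    apply List.filter_eq_self.mpr
    intro r hr
    simp [pNE]
    intro h'
    exact hnm (h' ▸ hr)
  | succ m ih =>
    intro rows h
    have hm : ([] : List Char) ∈ rows := by
      by_contra hn
      rw [List.count_eq_zero.mpr hn] at h
      omega
    rw [Function.iterate_succ_apply]
    have : (PySem.List.remove? rows ([] : List Char)).getD rows = rows.erase [] := by
      rw [PySem.List.remove?_eq_some_erase rows _ hm]; rfl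
    rw [this, ih _ (by rw [List.count_erase_self]; omega), filter_erase_nil]

-- A's value: number of non-empty rows of spl [] (dropLast l)
lemma count_rows_eq (text : String) (h : text.toList ≠ []) :
    count_rows text = (((spl [] text.toList.dropLast).countP pNE : Nat) : Int) := by
  have hloop := loopA text.toList text.toList.length 0 [] []
    (by omega) (List.length_pos_iff.mpr h)
  simp only [Nat.cast_zero] at hloop
  simp only [count_rows, hloop]
  simp only [List.drop_zero, List.nil_append]
  rw [PySem.List.count_eq, PySem.List.pyRange_zero_natCast]
  rw [List.foldl_map, foldl_const]
  rw [List.length_range]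
  rw [removeAll _ _ rfl]
  exact congrArg _ (Eq.symm List.countP_eq_length_filter)

-- ---- B-side ----

lemma loopB :
    ∀ (cs : List Char) (k : Int) (row : List Char) (prev : Char),
      (row = [] ↔ prev = '\n') →
      (cs.foldl (fun (st : Int × Char) c =>
        if c ≠ '\n' ∧ st.2 = '\n' then (st.1 + 1, c) else (st.1, c)) (k, prev)).1 =
      k + ((spl row cs).countP pNE : Int) - (if row.isEmpty then 0 else 1) := by
  intro cs
  induction cs with
  | nil =>
    intro k row prev _
    by_cases h : row = [] <;> simp [spl, h, pNE]
  | cons c cs ih =>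
    intro k row prev hinv
    by_cases hc : c = '\n'
    · subst hc
      simp only [List.foldl_cons, ne_eq, not_true_eq_false, false_and, if_false, if_neg]
      rw [ih k [] '\n' (by simp)]
      by_cases h : row = [] <;> simp [spl, h, pNE] <;> omega
    · by_cases hp : prev = '\n'
      · have hrow : row = [] := hinv.mpr hp
        subst hrow
        simp only [List.foldl_cons, hp, ne_eq, hc, not_false_eq_true, true_and, if_pos]
        rw [ih (k + 1) [c] c (by simp [hc])]
        simp [spl, hc, pNE]
        omega
      · have hrow : row ≠ [] := fun hr => hp (hinv.mp hr)
        simp only [List.foldl_cons, hp, and_false, if_neg, not_false_eq_true]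
        rw [ih k (row ++ [c]) c (by simp [hc])]
        simp [spl, hc, hrow, pNE]

lemma count_rows_alt_eq (text : String) :
    count_rows_alt text = (((spl [] text.toList).countP pNE : Nat) : Int) := by
  unfold count_rows_alt
  rw [loopB text.toList 0 [] '\n' (by simp)]
  simp

-- ---- linking spl over dropLast vs the full list ----

lemma spl_snoc_nl : ∀ (xs row : List Char), spl row (xs ++ ['\n']) = spl row xs ++ [[]] := by
  intro xs
  induction xs with
  | nil => intro row; simp [spl]
  | cons d xs ih =>
    intro row
    by_cases hd : d = '\n' <;> simp [spl, hd, ih]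

lemma spl_snoc_count (c : Char) (hc : c ≠ '\n') :
    ∀ (xs row : List Char), xs.getLast? ≠ some '\n' → (row ≠ [] ∨ xs ≠ []) →
      (spl row (xs ++ [c])).countP pNE = (spl row xs).countP pNE := by
  intro xs
  induction xs with
  | nil =>
    intro row _ h
    have hrow : row ≠ [] := by tauto
    simp [spl, hc, hrow, pNE]
  | cons d xs ih =>
    intro row hlast _
    by_cases hd : d = '\n'
    · subst hd
      have hxs : xs ≠ [] := by
        intro h; subst h; simp at hlast
      have hlast' : xs.getLast? ≠ some '\n' := by
        rwa [getLast?_cons_ne hxs] at hlast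
      have hrec := ih [] hlast' (Or.inr hxs)
      simp [spl, List.countP_cons, hrec]
    · simp only [spl, List.cons_append, if_neg hd]
      by_cases hxs : xs = []
      · subst hxs
        exact ih (row ++ [d]) (by simp) (Or.inl (by simp))
      · have hlast' : xs.getLast? ≠ some '\n' := by
          rwa [getLast?_cons_ne hxs] at hlast
        exact ih (row ++ [d]) hlast' (Or.inl (by simp))

lemma spl_snoc_succ (c : Char) (hc : c ≠ '\n') :
    ∀ (xs row : List Char), (xs = [] → row = []) →
      (xs.getLast? = some '\n' ∨ xs = []) →
      (spl row (xs ++ [c])).countP pNE = (spl row xs).countP pNE + 1 := by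
  intro xs
  induction xs with
  | nil =>
    intro row hrow _
    rw [hrow rfl]
    simp [spl, hc, pNE]
  | cons d xs ih =>
    intro row _ hlast
    by_cases hd : d = '\n'
    · subst hd
      by_cases hxs : xs = []
      · subst hxs
        simp [spl, hc, pNE, List.countP_cons]
        omega
      · have hlast' : xs.getLast? = some '\n' := by
          rcases hlast with h | h
          · rwa [getLast?_cons_ne hxs] at h
          · simp at h
        have hrec := ih [] (fun h => absurd h hxs) (Or.inl hlast')
        simp [spl, List.countP_cons, hrec]
        omega
    · -- d ≠ '\n': then the hypothesis forces a contradiction unless xs ≠ [] with last '\n'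
      simp only [spl, List.cons_append, if_neg hd]
      have hxs : xs ≠ [] := by
        intro h; subst h
        rcases hlast with h | h
        · simp at h; exact hd h
        · simp at h
      have hlast' : xs.getLast? = some '\n' := by
        rcases hlast with h | h
        · rwa [getLast?_cons_ne hxs] at h
        · simp at h
      exact ih (row ++ [d]) (fun h => absurd h hxs) (Or.inl hlast')

-- empty text: A returns 0
lemma count_rows_nil (text : String) (h : text.toList = []) : count_rows text = 0 := by
  unfold count_rows
  rw [h]
  simp [PySem.List.pyRange, PySem.List.count_eq]

-- ===== VERDICT (by name: the statement is the Claim_ definition above) =====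
theorem count_rows_spec : Claim_unchanged_count_rows := by
  intro text _ hD
  by_cases hnil : text.toList = []
  · rw [count_rows_nil text hnil, count_rows_alt_eq, hnil]
    simp [spl, pNE]
  · rw [count_rows_eq text hnil, count_rows_alt_eq]
    have hsplit : text.toList = text.toList.dropLast ++ [text.toList.getLast hnil] :=
      (List.dropLast_concat_getLast hnil).symm
    by_cases hlastnl : text.toList.getLast hnil = '\n'
    · conv_rhs => rw [hsplit, hlastnl]
      rw [spl_snoc_nl]
      simp [List.countP_append, pNE]
    · -- ¬D_ gives: length ≥ 2 and the char before last is not '\n'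
      unfold D_count_rows at hD
      push_neg at hD
      have hgl : text.toList.getLast? ≠ some '\n' := by
        rw [List.getLast?_eq_some_getLast hnil]
        simp [hlastnl]
      have hD2 := hD hnil hgl
      have hlen : text.toList.length ≠ 1 := hD2.1
      have hprev : text.toList.dropLast.getLast? ≠ some '\n' := hD2.2
      have hxs : text.toList.dropLast ≠ [] := by
        have h2 : 0 < text.toList.length := List.length_pos_iff.mpr hnil
        intro h
        have h3 := congrArg List.length h
        rw [List.length_dropLast] at h3
        simp only [List.length_nil] at h3
        exact hlen (by omega)
      conv_rhs => rw [hsplit]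
      rw [spl_snoc_count _ hlastnl _ _ hprev (Or.inr hxs)]

theorem count_rows_changed : Claim_changed_count_rows := by
  unfold Claim_changed_count_rows; decide

theorem count_rows_tight : Claim_exact_count_rows := by
  intro text _ hD
  obtain ⟨hnil, hgl, hD3⟩ := hD
  have hlastnl : text.toList.getLast hnil ≠ '\n' := by
    intro h
    exact hgl (by rw [List.getLast?_eq_some_getLast hnil, h])
  have hsplit : text.toList = text.toList.dropLast ++ [text.toList.getLast hnil] :=
    (List.dropLast_concat_getLast hnil).symm
  rw [count_rows_eq text hnil, count_rows_alt_eq]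
  have hrow : text.toList.dropLast = [] → ([] : List Char) = [] := fun _ => rfl
  have hcond : text.toList.dropLast.getLast? = some '\n' ∨ text.toList.dropLast = [] := by
    rcases hD3 with h | h
    · right
      cases hl : text.toList with
      | nil => exact absurd hl hnil
      | cons x xs =>
        rw [hl] at h
        simp at h
        simp [hl, h]
    · left; exact h
  have := spl_snoc_succ _ hlastnl text.toList.dropLast [] hrow hcond
  conv_rhs => rw [hsplit]
  rw [this]
  intro h
  omega
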